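-- pv_equiv track=rewrite | github.com/nocarend/ProjectEulersolutions | 5.py | smallest_d
-- ===== SOURCE A (Python) =====
-- import math
--
-- def smallest_d(k):
--     prime_factors = [2]
--     i = 3
--     while i < k:
--         factor = i
--         for x in range(0, len(prime_factors)):
--             if i % prime_factors[x] == 0:
--                 factor //= prime_factors[x]
--         if factor > 1:
--             prime_factors.append(factor)
--         i += 1
--     return math.prod(prime_factors)
-- ===== SOURCE B (Python) =====
-- import math
--
-- def smallest_d(k):
--     # running least common multiple of 2..k-1 via gcd; no factor list at all
--     result = 2
--     for i in range(3, k):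
--         result = result * i // math.gcd(result, i)
--     return result
-- ===== Notes on version B (the rewrite author's own statement) =====
-- stated objective: alternative
-- what changed: B drops A's factor list and per-element trial divisions entirely: it maintains one running accumulator updated as result = result*i // gcd(result,i) (an incremental lcm), relying on the fact that A's list is exactly the prime factorization of lcm(2..i-1).
import Mathlib
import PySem

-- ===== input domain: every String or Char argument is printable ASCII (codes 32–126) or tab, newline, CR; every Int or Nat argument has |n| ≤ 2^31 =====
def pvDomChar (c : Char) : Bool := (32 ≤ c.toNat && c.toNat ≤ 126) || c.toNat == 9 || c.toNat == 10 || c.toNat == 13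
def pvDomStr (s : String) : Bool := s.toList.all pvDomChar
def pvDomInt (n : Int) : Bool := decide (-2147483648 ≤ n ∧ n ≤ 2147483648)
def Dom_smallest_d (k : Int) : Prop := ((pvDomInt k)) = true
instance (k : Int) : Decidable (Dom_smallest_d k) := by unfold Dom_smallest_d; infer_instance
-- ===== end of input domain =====

-- B replaces A's factor list and its per-element trial divisions by a single running
-- accumulator updated with lcm via gcd (result = result*i // gcd(result,i)); no list at all
-- (objective: alternative). Equality rests on: A's list is the prime factorization of lcm(2..i-1).


-- ===== PORT A =====
-- while i < k runs (k-3).toNat times with i = 3, 4, …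
def smallestDLoopA : Nat → Int → List Int → List Int
  | 0, _, pf => pf
  | n + 1, i, pf =>
    let factor := (PySem.List.pyRange 0 (pf.length : Int) 1).foldl
      (fun f x => if PySem.Int.mod i (PySem.List.pyGetD pf x 0) == 0
                  then PySem.Int.floordiv f (PySem.List.pyGetD pf x 0) else f) i
    smallestDLoopA n (i + 1) (if factor > 1 then pf ++ [factor] else pf)

def smallest_d (k : Int) : Int :=
  (smallestDLoopA (k - 3).toNat 3 [2]).prod    -- math.prod

-- ===== PORT B =====
-- for i in range(3, k): result = result * i // math.gcd(result, i)
def smallest_d_alt (k : Int) : Int :=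
  (PySem.List.pyRange 3 k 1).foldl
    (fun result i => PySem.Int.floordiv (result * i) ((Int.gcd result i : Nat) : Int)) 2

-- ===== PRECONDITION & SPEC =====
def Spec_smallest_d (k : Int) (out : Int) : Prop := out = smallest_d_alt k
instance (k : Int) (out : Int) : Decidable (Spec_smallest_d k out) := by unfold Spec_smallest_d; infer_instance

-- ===== CLAIM (what is proved, stated in full; the proofs are below) =====
def Claim_equal_smallest_d : Prop := ∀ (k : Int), Dom_smallest_d k → Spec_smallest_d k (smallest_d k)

-- ===== LEMMAS AND PROOFS =====

-- Nat-level model of B's loop: fold of lcm over i, i+1, …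
def lcmFold : Nat → Nat → Nat → Nat
  | 0, _, r => r
  | n + 1, i, r => lcmFold n (i + 1) (Nat.lcm r i)

-- the invariant carried along A's loop: for every prime p, the number of copies of p in the
-- list is the largest exponent c with p^c ≤ i-1
def Hinv (i : Nat) (l : List Nat) : Prop :=
  ∀ p : Nat, p.Prime → p ^ (l.count p) ≤ i - 1 ∧ i - 1 < p ^ (l.count p + 1)

-- A's sequential trial divisions are one floor division by the product of the divisors
lemma foldl_div_filter (i : Int) :
    ∀ (l : List Int) (a : Int), (∀ p ∈ l, 0 < p) →
      l.foldl (fun f p => if PySem.Int.mod i p == 0 then PySem.Int.floordiv f p else f) a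
        = PySem.Int.floordiv a ((l.filter (fun p => PySem.Int.mod i p == 0)).prod) := by
  intro l
  induction l with
  | nil =>
      intro a _
      simp [PySem.Int.floordiv]
  | cons p t ih =>
      intro a hpos
      have hp : 0 < p := hpos p (by simp)
      have ht : ∀ x ∈ t, 0 < x := fun x hx => hpos x (by simp [hx])
      have htp : 0 < (t.filter (fun x => PySem.Int.mod i x == 0)).prod := by
        apply List.prod_pos
        intro x hx
        exact ht x (List.mem_of_mem_filter hx)
      by_cases hq : PySem.Int.mod i p == 0
      · have hf : List.filter (fun x => PySem.Int.mod i x == 0) (p :: t)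
            = p :: List.filter (fun x => PySem.Int.mod i x == 0) t := by
          simp [hq]
        rw [List.foldl_cons, if_pos hq, ih (PySem.Int.floordiv a p) ht, hf, List.prod_cons,
            PySem.Int.floordiv_eq_ediv_of_pos hp,
            PySem.Int.floordiv_eq_ediv_of_pos htp,
            PySem.Int.floordiv_eq_ediv_of_pos (mul_pos hp htp),
            Int.ediv_ediv_of_nonneg (le_of_lt hp)]
      · have hf : List.filter (fun x => PySem.Int.mod i x == 0) (p :: t)
            = List.filter (fun x => PySem.Int.mod i x == 0) t := by
          simp [hq]
        rw [List.foldl_cons, if_neg hq, hf]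
        exact ih a ht

-- count of a prime in an all-prime list = its exponent in the product
lemma count_eq_factorization (l : List Nat) (hl : ∀ p ∈ l, p.Prime) (p : Nat) :
    (l.prod).factorization p = l.count p := by
  induction l with
  | nil => simp
  | cons q t ih =>
      have hq : q.Prime := hl q (by simp)
      have ht : ∀ x ∈ t, x.Prime := fun x hx => hl x (by simp [hx])
      have htne : t.prod ≠ 0 := (List.prod_pos (fun x hx => (ht x hx).pos)).ne'
      rw [List.prod_cons, Nat.factorization_mul hq.ne_zero htne, Finsupp.add_apply,
        hq.factorization, ih ht, List.count_cons, Finsupp.single_apply]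
      by_cases h : q = p <;> simp [h]
      omega

-- a list of primes has positive product
lemma prod_pos_of_prime (l : List Nat) (hl : ∀ p ∈ l, p.Prime) : 0 < l.prod := by
  apply List.prod_pos
  intro x hx
  exact (hl x hx).pos

-- product of the elements dividing a non-prime-power i is a multiple of i
lemma dvd_dN_of_not_pp (i : Nat) (hi : 3 ≤ i) (hnpp : ¬ IsPrimePow i)
    (l : List Nat) (hl : ∀ p ∈ l, p.Prime) (hinv : Hinv i l) :
    i ∣ (l.filter (fun p => decide (p ∣ i))).prod := by
  set F := l.filter (fun p => decide (p ∣ i)) with hF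
  have hFl : ∀ p ∈ F, p.Prime := fun p hp => hl p (List.mem_of_mem_filter hp)
  have hF0 : F.prod ≠ 0 := (List.prod_pos (fun x hx => (hFl x hx).pos)).ne'
  have hi0 : i ≠ 0 := by omega
  rw [← Nat.factorization_le_iff_dvd hi0 hF0]
  intro p
  by_cases hv : i.factorization p = 0
  · simp [hv]
  · have hp : p.Prime := Nat.prime_of_mem_primeFactors (by
      rw [← Nat.support_factorization]; exact Finsupp.mem_support_iff.mpr hv)
    have hpd : p ∣ i := Nat.dvd_of_factorization_pos hv
    have hcf : F.prod.factorization p = l.count p := by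
      rw [count_eq_factorization F hFl p, hF, List.count_filter (by simp [hpd])]
    rw [hcf]
    set v := i.factorization p with hvdef
    have hdvd : p ^ v ∣ i := Nat.ordProj_dvd i p
    have hne : p ^ v ≠ i := by
      intro h
      exact hnpp ⟨p, v, hp.prime, by omega, h⟩
    have hlt : p ^ v < i := lt_of_le_of_ne (Nat.le_of_dvd (by omega) hdvd) hne
    have h2 := (hinv p hp).2
    have := lt_of_le_of_lt (by omega : p ^ v ≤ i - 1) h2
    have := (Nat.pow_lt_pow_iff_right hp.one_lt).mp this
    omega

-- on a prime power i = p^e the dividing elements multiply to p^(e-1)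
lemma dN_of_pp (i p e : Nat) (hp : p.Prime) (he : 0 < e) (hie : i = p ^ e) (hi : 3 ≤ i)
    (l : List Nat) (hl : ∀ q ∈ l, q.Prime) (hinv : Hinv i l) :
    (l.filter (fun q => decide (q ∣ i))).prod = p ^ (e - 1) ∧ l.count p = e - 1 := by
  have hc : l.count p = e - 1 := by
    have h1 := (hinv p hp).1
    have h2 := (hinv p hp).2
    set c := l.count p
    have hle : p ^ c < p ^ e := by
      calc p ^ c ≤ i - 1 := h1
      _ < i := by omega
      _ = p ^ e := hie
    have hce : c < e := (Nat.pow_lt_pow_iff_right hp.one_lt).mp hle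
    have : i - 1 < p ^ (c + 1) := h2
    have : p ^ e ≤ p ^ (c + 1) := by omega
    have := (Nat.pow_le_pow_iff_right hp.one_lt).mp this
    omega
  refine ⟨?_, hc⟩
  have hfe : l.filter (fun q => decide (q ∣ i)) = l.filter (fun q => q == p) := by
    apply List.filter_congr
    intro x hx
    have hxp : x.Prime := hl x hx
    rw [Bool.eq_iff_iff]
    simp only [decide_eq_true_eq, beq_iff_eq]
    constructor
    · intro hdvd
      subst hie
      exact ((Nat.prime_dvd_prime_iff_eq hxp hp).mp (hxp.dvd_of_dvd_pow hdvd))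
    · intro h; subst h; subst hie
      exact dvd_pow_self _ he.ne'
  rw [hfe]
  have hall : ∀ x ∈ l.filter (fun q => q == p), x = p := by
    intro x hx
    simpa using (List.of_mem_filter hx)
  rw [List.prod_eq_pow_card _ p hall, ← hc, List.count, List.countP_eq_length_filter]

-- lcm step, non prime power: lcm(L, i) = L when i divides L
lemma lcm_eq_left_of_dvd (L i : Nat) (h : i ∣ L) : Nat.lcm L i = L :=
  Nat.dvd_antisymm (Nat.lcm_dvd dvd_rfl h) (Nat.dvd_lcm_left L i)

-- lcm step, prime power i = p^e with v_p(L) = e-1: lcm(L, i) = L * p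
lemma lcm_pp (L p e : Nat) (hp : p.Prime) (he : 0 < e) (hL : L ≠ 0)
    (hv : L.factorization p = e - 1) : Nat.lcm L (p ^ e) = L * p := by
  have hgcd : Nat.gcd L (p ^ e) = p ^ (e - 1) := by
    apply Nat.dvd_antisymm
    · obtain ⟨j, hj, hm⟩ := (Nat.dvd_prime_pow hp).mp (Nat.gcd_dvd_right L (p ^ e))
      have hjL : p ^ j ∣ L := hm ▸ Nat.gcd_dvd_left L (p ^ e)
      have : j ≤ L.factorization p := (hp.pow_dvd_iff_le_factorization hL).mp hjL
      rw [hm]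
      exact Nat.pow_dvd_pow p (by omega)
    · refine Nat.dvd_gcd ?_ (Nat.pow_dvd_pow p (by omega))
      rw [← hv]; exact Nat.ordProj_dvd L p
  rw [Nat.lcm, hgcd]
  have : L * p ^ e = (L * p) * p ^ (e - 1) := by
    rw [mul_assoc, ← pow_succ']
    congr 2
    omega
  rw [this]
  exact Nat.mul_div_cancel (L * p) (pow_pos hp.pos _)

-- the invariant survives one step
lemma hinv_step_pp (i p e : Nat) (hp : p.Prime) (he : 0 < e) (hie : i = p ^ e) (hi : 3 ≤ i)
    (l : List Nat) (hinv : Hinv i l) (hc : l.count p = e - 1) :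
    Hinv (i + 1) (l ++ [p]) := by
  intro q hq
  rw [List.count_append, List.count_singleton]
  by_cases hqp : q = p
  · subst hqp
    norm_num
    have hce : l.count q + 1 = e := by omega
    rw [hce]
    refine ⟨by omega, ?_⟩
    have : q ^ (e + 1) = i * q := by rw [pow_succ, ← hie]
    rw [this]
    have := hp.two_le
    calc i + 1 - 1 = i := by omega
    _ < i * q := by nlinarith
  · obtain ⟨h1, h2⟩ := hinv q hq
    have hne : i ≠ q ^ (l.count q + 1) := by
      intro h
      have : q ∣ i := h ▸ dvd_pow_self q (Nat.succ_ne_zero _)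
      rw [hie] at this
      exact hqp ((Nat.prime_dvd_prime_iff_eq hq hp).mp (hq.dvd_of_dvd_pow this))
    have hc0 : (if p == q then 1 else 0) = 0 := by simp [Ne.symm hqp]
    rw [hc0]
    simp only [Nat.add_zero]
    constructor
    · omega
    · omega
lemma hinv_step_npp (i : Nat) (hi : 3 ≤ i) (hnpp : ¬ IsPrimePow i)
    (l : List Nat) (hinv : Hinv i l) : Hinv (i + 1) l := by
  intro q hq
  obtain ⟨h1, h2⟩ := hinv q hq
  constructor
  · omega
  · rcases Nat.lt_or_ge (i) (q ^ (l.count q + 1)) with h | h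
    · omega
    · exfalso
      have : i = q ^ (l.count q + 1) := by omega
      exact hnpp ⟨q, l.count q + 1, hq.prime, by omega, this.symm⟩

-- main invariant: A's loop's product follows the lcm fold
lemma loopA_prod : ∀ (n i : Nat) (l : List Nat), 3 ≤ i → (∀ p ∈ l, p.Prime) → Hinv i l →
    (smallestDLoopA n (i : Int) (l.map (Nat.cast : Nat → Int))).prod
      = ((lcmFold n i l.prod : Nat) : Int) := by
  intro n
  induction n with
  | zero =>
      intro i l _ _ _
      simp [smallestDLoopA, lcmFold, ← Nat.cast_list_prod]
  | succ m ih =>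
      intro i l hi hl hinv
      have hposZ : ∀ x ∈ l.map (Nat.cast : Nat → Int), 0 < x := by
        intro x hx
        obtain ⟨q, hq, rfl⟩ := List.mem_map.mp hx
        exact_mod_cast (hl q hq).pos
      -- the inner for-loop = one floordiv by the product of the dividing elements
      have hfold : (PySem.List.pyRange 0 ((l.map (Nat.cast : Nat → Int)).length : Int) 1).foldl
          (fun f x => if PySem.Int.mod (i : Int) (PySem.List.pyGetD (l.map (Nat.cast : Nat → Int)) x 0) == 0
                      then PySem.Int.floordiv f (PySem.List.pyGetD (l.map (Nat.cast : Nat → Int)) x 0) else f) (i : Int)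
          = PySem.Int.floordiv (i : Int)
              (((l.map (Nat.cast : Nat → Int)).filter (fun p => PySem.Int.mod (i : Int) p == 0)).prod) := by
        rw [PySem.List.foldl_pyRange_zero_pyGetD' (l.map (Nat.cast : Nat → Int)) 0
          (fun f p => if PySem.Int.mod (i : Int) p == 0 then PySem.Int.floordiv f p else f) (i : Int)]
        exact foldl_div_filter (i : Int) _ (i : Int) hposZ
      -- push the filter through the cast
      have hfilter : ((l.map (Nat.cast : Nat → Int)).filter (fun p => PySem.Int.mod (i : Int) p == 0))
          = (l.filter (fun p => decide (p ∣ i))).map (Nat.cast : Nat → Int) := by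
        rw [List.filter_map]
        congr 1
        apply List.filter_congr
        intro p hp
        have hppos : 0 < p := (hl p hp).pos
        simp only [Function.comp]
        rw [Bool.eq_iff_iff, beq_iff_eq, decide_eq_true_eq,
          PySem.Int.mod_eq_zero_iff_dvd _ _]
        exact ⟨fun h => by exact_mod_cast h, fun h => by exact_mod_cast h⟩
      set dN : Nat := (l.filter (fun p => decide (p ∣ i))).prod with hdN
      have hdNl : ∀ p ∈ l.filter (fun p => decide (p ∣ i)), p.Prime :=
        fun p hp => hl p (List.mem_of_mem_filter hp)
      have hdNpos : 0 < dN := prod_pos_of_prime _ hdNl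
      have hfactor : (PySem.List.pyRange 0 ((l.map (Nat.cast : Nat → Int)).length : Int) 1).foldl
          (fun f x => if PySem.Int.mod (i : Int) (PySem.List.pyGetD (l.map (Nat.cast : Nat → Int)) x 0) == 0
                      then PySem.Int.floordiv f (PySem.List.pyGetD (l.map (Nat.cast : Nat → Int)) x 0) else f) (i : Int)
          = ((i / dN : Nat) : Int) := by
        rw [hfold, hfilter, ← Nat.cast_list_prod, ← hdN, PySem.Int.floordiv_natCast]
      have hL0 : l.prod ≠ 0 := (prod_pos_of_prime l hl).ne'
      show (smallestDLoopA (m+1) (i : Int) (l.map (Nat.cast : Nat → Int))).prod = _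
      rw [smallestDLoopA]
      simp only [hfactor]
      by_cases hpp : IsPrimePow i
      · obtain ⟨p, e, hpP, he, hpe⟩ := hpp
        have hp : p.Prime := Nat.prime_iff.mpr hpP
        have hie : i = p ^ e := hpe.symm
        obtain ⟨hdval, hcval⟩ := dN_of_pp i p e hp he hie hi l hl hinv
        have hdval' : dN = p ^ (e - 1) := hdval
        have hquot : i / dN = p := by
          rw [hdval', hie, Nat.pow_div (by omega) hp.pos]
          have : e - (e - 1) = 1 := by omega
          rw [this, pow_one]
        rw [hquot]
        have hgt : ((p : Nat) : Int) > 1 := by exact_mod_cast hp.one_lt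
        rw [if_pos hgt]
        have hmap : l.map (Nat.cast : Nat → Int) ++ [((p : Nat) : Int)]
            = (l ++ [p]).map (Nat.cast : Nat → Int) := by simp
        have harg : ((i : Nat) : Int) + 1 = ((i + 1 : Nat) : Int) := by push_cast; ring
        rw [hmap, harg, ih (i + 1) (l ++ [p]) (by omega)
          (by intro q hq; rcases List.mem_append.mp hq with h | h
              · exact hl q h
              · simp only [List.mem_singleton] at h; subst h; exact hp)
          (hinv_step_pp i p e hp he hie hi l hinv hcval)]
        show _ = ((lcmFold (m+1) i l.prod : Nat) : Int)
        rw [lcmFold]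
        congr 2
        rw [List.prod_append, List.prod_singleton]
        rw [hie, lcm_pp l.prod p e hp he hL0 (by rw [count_eq_factorization l hl p, hcval])]
      · have hdvd : i ∣ dN := dvd_dN_of_not_pp i hi hpp l hl hinv
        have hge : i ≤ dN := Nat.le_of_dvd hdNpos hdvd
        have hle1 : i / dN ≤ 1 := le_trans (Nat.div_le_div_right hge) (by rw [Nat.div_self hdNpos])
        have hnot : ¬ (((i / dN : Nat) : Int) > 1) := by
          push_cast
          omega
        rw [if_neg hnot]
        have harg : ((i : Nat) : Int) + 1 = ((i + 1 : Nat) : Int) := by push_cast; ring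
        rw [harg, ih (i + 1) l (by omega) hl (hinv_step_npp i hi hpp l hinv)]
        show _ = ((lcmFold (m+1) i l.prod : Nat) : Int)
        rw [lcmFold]
        congr 2
        have hdl : dN ∣ l.prod := List.Sublist.prod_dvd_prod List.filter_sublist
        rw [lcm_eq_left_of_dvd _ _ (dvd_trans hdvd hdl)]


-- B's Int fold over the range is the Nat lcm fold
lemma loopB_eq : ∀ (n i L : Nat), 1 ≤ i → 1 ≤ L →
    (PySem.List.pyRange (i : Int) ((i : Int) + (n : Int)) 1).foldl
      (fun result j => PySem.Int.floordiv (result * j) ((Int.gcd result j : Nat) : Int)) (L : Int)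
      = ((lcmFold n i L : Nat) : Int) := by
  intro n
  induction n with
  | zero =>
      intro i L _ _
      rw [PySem.List.pyRange_one_eq_nil (by simp)]
      simp [lcmFold]
  | succ m ih =>
      intro i L hi hL
      rw [PySem.List.pyRange_one_cons (by push_cast; omega)]
      rw [List.foldl_cons]
      have hstep : PySem.Int.floordiv ((L : Int) * (i : Int)) ((Int.gcd (L : Int) (i : Int) : Nat) : Int)
          = ((Nat.lcm L i : Nat) : Int) := by
        rw [Int.gcd_natCast_natCast, ← Nat.cast_mul,
          PySem.Int.floordiv_natCast]
        rfl
      rw [hstep]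
      have harg : ((i : Int) + 1) = ((i + 1 : Nat) : Int) := by push_cast; ring
      have harg2 : ((i : Int) + ((m + 1 : Nat) : Int)) = (((i + 1 : Nat)) : Int) + ((m : Nat) : Int) := by
        push_cast; ring
      rw [harg, harg2, ih (i + 1) (Nat.lcm L i) (by omega)
        (Nat.pos_of_ne_zero (Nat.lcm_ne_zero (by omega) (by omega)))]
      rfl


-- ===== VERDICT (by name: the statement is the Claim_ definition above) =====
theorem smallest_d_spec : Claim_equal_smallest_d := by
  intro k _
  unfold Spec_smallest_d smallest_d smallest_d_alt
  by_cases hk : k ≤ 3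
  · have h0 : (k - 3).toNat = 0 := by omega
    rw [h0, PySem.List.pyRange_one_eq_nil hk]
    simp [smallestDLoopA]
  · push Not at hk
    have hinv3 : Hinv 3 [2] := by
      intro p hp
      by_cases h : p = 2
      · subst h
        have hc : List.count 2 [2] = 1 := by rfl
        rw [hc]
        norm_num
      · have hc : List.count p [2] = 0 := by
          simp [Ne.symm h]
        have h3 : 3 ≤ p := by have := hp.two_le; omega
        rw [hc]
        norm_num
        omega
    have hA := loopA_prod (k - 3).toNat 3 [2] (le_refl 3)
      (by intro p hp; simp only [List.mem_singleton] at hp; subst hp; exact Nat.prime_two) hinv3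
    have hB := loopB_eq (k - 3).toNat 3 2 (by omega) (by omega)
    have hmap : ([2] : List Nat).map (Nat.cast : Nat → Int) = [(2 : Int)] := by norm_num
    have h3 : (((3 : Nat)) : Int) = (3 : Int) := by norm_num
    have hk3 : k = (3 : Int) + (((k - 3).toNat : Nat) : Int) := by omega
    rw [hmap, h3] at hA
    rw [h3, show ((3:Int) + (((k - 3).toNat : Nat) : Int)) = k from by omega] at hB
    norm_num at hB
    rw [hA, hB]
    rfl
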